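-- pv_equiv track=rewrite | github.com/AndrewSauer/Go-Engine | main.py | remove_surrounded
-- ===== SOURCE A (Python) =====
-- def copy_list(l):
--     if type(l)==list:
--         result=[]
--         for i in l:
--             result.append(copy_list(i))
--         return result
--     else:
--         return l
--
-- def remove_surrounded(position,color):
--     grouped=copy_list(position)#0=group not found yet, 1=group found and checked, 2=current group we're checking
--     for i in range(len(grouped)):
--         for j in range(len(grouped[i])):
--             grouped[i][j]=0#an array of zeros the same size as position
--     new_position=copy_list(position)
--     for i in range(len(position)):
--         for j in range(len(position)):#we only support square boards
--             if position[i][j]==color and grouped[i][j]==0:#if the stone hasn't been shown to be part of a group yet: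
--                 #Find the group, and remove it if no liberties
--                 tuples=[(i,j)]#stones we know are part of the group, but haven't yet checked for liberties and adjacent stones
--                 checked=[]#stones we've checked already as part of the group
--                 liberties=False#flip to true if we ever find a liberty
--                 while len(tuples)>0:
--                     tup=tuples.pop()#deal with the last one
--                     checked.append(tup)
--                     grouped[tup[0]][tup[1]]=1
--                     if tup[0]>0 and position[tup[0]-1][tup[1]]==color and grouped[tup[0]-1][tup[1]]==0:#check left for group stone
--                         tuples.append((tup[0]-1,tup[1]))
--                     if tup[1]>0 and position[tup[0]][tup[1]-1]==color and grouped[tup[0]][tup[1]-1]==0:#check up for group stone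
--                         tuples.append((tup[0],tup[1]-1))
--                     if tup[0]<len(position)-1 and position[tup[0]+1][tup[1]]==color and grouped[tup[0]+1][tup[1]]==0:#check right for group stone
--                         tuples.append((tup[0]+1,tup[1]))
--                     if tup[1]<len(position)-1 and position[tup[0]][tup[1]+1]==color and grouped[tup[0]][tup[1]+1]==0:#check down for group stone
--                         tuples.append((tup[0],tup[1]+1))
--                     if not liberties and tup[0]>0 and position[tup[0]-1][tup[1]]==0:#check for liberties
--                         liberties=True
--                     if not liberties and tup[1]>0 and position[tup[0]][tup[1]-1]==0:
--                         liberties=True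
--                     if not liberties and tup[0]<len(position)-1 and position[tup[0]+1][tup[1]]==0:
--                         liberties=True
--                     if not liberties and tup[1]<len(position)-1 and position[tup[0]][tup[1]+1]==0:
--                         liberties=True
--                 #Now we've set all stones in the group to 1.
--                 #remove stones in the group if no liberties
--                 if not liberties:
--                     for tup in checked:
--                         new_position[tup[0]][tup[1]]=0
--     return new_position
-- ===== SOURCE B (Python) =====
-- def remove_surrounded(position, color):
--     # Chaotic-iteration / dataflow alternative: instead of per-group DFS flood fills,
--     # compute the set of "alive" color stones as the least fixpoint of
--     #   alive = { color cells with an empty neighbour or a neighbour already alive }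
--     # by iterating the pure round function until it stops changing, then rebuild the
--     # board zeroing the color cells that are not alive.
--     n = len(position)
--     alive = set()
--     while True:
--         new = {(i, j) for i in range(n) for j in range(n)
--                if position[i][j] == color and (
--                    (i > 0 and position[i - 1][j] == 0) or
--                    (j > 0 and position[i][j - 1] == 0) or
--                    (i + 1 < n and position[i + 1][j] == 0) or
--                    (j + 1 < n and position[i][j + 1] == 0) or
--                    (i > 0 and (i - 1, j) in alive) or
--                    (j > 0 and (i, j - 1) in alive) or
--                    (i + 1 < n and (i + 1, j) in alive) or
--                    (j + 1 < n and (i, j + 1) in alive))}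
--         if new == alive:
--             break
--         alive = new
--     return [[0 if j < n and row[j] == color and (i, j) not in alive else row[j]
--              for j in range(len(row))]
--             for i, row in enumerate(position)]
-- ===== Notes on version B (the rewrite author's own statement) =====
-- stated objective: alternative
-- what changed: Replaced the per-group DFS flood fill with mutable 'grouped' marks and a liberty flag by a global chaotic-iteration fixpoint: the set of alive color stones is grown by iterating a pure whole-board round function until it stops changing, then the board is rebuilt in one comprehension zeroing dead color stones.
import Mathlib
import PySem

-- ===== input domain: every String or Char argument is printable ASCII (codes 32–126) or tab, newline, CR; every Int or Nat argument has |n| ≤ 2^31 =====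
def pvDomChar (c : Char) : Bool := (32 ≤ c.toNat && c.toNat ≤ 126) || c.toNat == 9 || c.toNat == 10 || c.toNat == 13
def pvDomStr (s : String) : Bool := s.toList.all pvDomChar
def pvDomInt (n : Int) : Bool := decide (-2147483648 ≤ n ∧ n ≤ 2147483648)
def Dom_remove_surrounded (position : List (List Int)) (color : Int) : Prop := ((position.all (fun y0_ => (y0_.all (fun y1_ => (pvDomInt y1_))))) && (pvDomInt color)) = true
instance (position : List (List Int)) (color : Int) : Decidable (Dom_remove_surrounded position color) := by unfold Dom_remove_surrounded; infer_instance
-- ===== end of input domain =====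

-- B replaces A's per-group DFS flood fill by a global chaotic-iteration fixpoint of the
-- "alive" set (alternative decomposition, not claimed faster); return values agree on Pre_.

-- ===== PORT A =====
-- nested-list access position[i][j] (indices are always in range under Pre_; getD is exact there)
def pvAt (m : List (List Int)) (i j : Nat) : Int := (m.getD i []).getD j 0
-- nested-list assignment m[i][j] = v (exact under Pre_; a no-op out of range, unreached there)
def pvSet2 (m : List (List Int)) (i j : Nat) (v : Int) : List (List Int) :=
  m.set i ((m.getD i []).set j v)

-- the inner `while len(tuples)>0` flood loop of A; the Lean stack's head is Python's list end
-- (the append/pop site), so pushes cons in source order and the pop takes the head.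
-- `fuel` only makes the recursion structural: A's caller passes 4*n*n+2, shown sufficient below.
def pvFlood (pos : List (List Int)) (color : Int) (n : Nat) :
    Nat → List (Nat × Nat) → List (Nat × Nat) → List (List Int) → Bool →
    List (Nat × Nat) × List (List Int) × Bool
  | 0, _, C, g, b => (C, g, b)
  | fuel + 1, T, C, g, b =>
    match T with
    | [] => (C, g, b)
    | tup :: T' =>
      let C' := C ++ [tup]
      let g' := pvSet2 g tup.1 tup.2 1
      let T1 := if 0 < tup.1 ∧ pvAt pos (tup.1-1) tup.2 = color ∧ pvAt g' (tup.1-1) tup.2 = 0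
                then (tup.1-1, tup.2) :: T' else T'
      let T2 := if 0 < tup.2 ∧ pvAt pos tup.1 (tup.2-1) = color ∧ pvAt g' tup.1 (tup.2-1) = 0
                then (tup.1, tup.2-1) :: T1 else T1
      let T3 := if tup.1+1 < n ∧ pvAt pos (tup.1+1) tup.2 = color ∧ pvAt g' (tup.1+1) tup.2 = 0
                then (tup.1+1, tup.2) :: T2 else T2
      let T4 := if tup.2+1 < n ∧ pvAt pos tup.1 (tup.2+1) = color ∧ pvAt g' tup.1 (tup.2+1) = 0
                then (tup.1, tup.2+1) :: T3 else T3
      let b' := ((b || decide (0 < tup.1 ∧ pvAt pos (tup.1-1) tup.2 = 0))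
                   || decide (0 < tup.2 ∧ pvAt pos tup.1 (tup.2-1) = 0))
                   || decide (tup.1+1 < n ∧ pvAt pos (tup.1+1) tup.2 = 0)
                   || decide (tup.2+1 < n ∧ pvAt pos tup.1 (tup.2+1) = 0)
      pvFlood pos color n fuel T4 C' g' b'

def remove_surrounded (position : List (List Int)) (color : Int) : List (List Int) :=
  let n := position.length
  -- grouped = copy_list(position), then the double loop setting every entry to 0
  let grouped0 := (List.range n).foldl (fun g i =>
      (List.range ((g.getD i []).length)).foldl (fun g2 j => pvSet2 g2 i j 0) g) position
  -- new_position = copy_list(position): lists are immutable values here, the copy is position itself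
  let step := fun (st : List (List Int) × List (List Int)) (z : Nat × Nat) =>
    if pvAt position z.1 z.2 = color ∧ pvAt st.1 z.1 z.2 = 0 then
      let r := pvFlood position color n (4*n*n+2) [z] [] st.1 false
      if r.2.2 = false then
        (r.2.1, r.1.foldl (fun np t => pvSet2 np t.1 t.2 0) st.2)
      else (r.2.1, st.2)
    else st
  (((List.range n).flatMap (fun i => (List.range n).map (fun j => (i, j)))).foldl step
    (grouped0, position)).2

-- ===== PORT B =====
-- one round of B's chaotic iteration: the set comprehension over all cells
def pvBRound (position : List (List Int)) (color : Int) (n : Nat)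
    (alive : PySem.Set (Nat × Nat)) : PySem.Set (Nat × Nat) :=
  PySem.Set.ofList <|
    (List.range n).flatMap (fun i => (List.range n).filterMap (fun j =>
      if pvAt position i j = color ∧
          ((0 < i ∧ pvAt position (i-1) j = 0) ∨ (0 < j ∧ pvAt position i (j-1) = 0) ∨
           (i+1 < n ∧ pvAt position (i+1) j = 0) ∨ (j+1 < n ∧ pvAt position i (j+1) = 0) ∨
           (0 < i ∧ (i-1, j) ∈ alive) ∨ (0 < j ∧ (i, j-1) ∈ alive) ∨
           (i+1 < n ∧ (i+1, j) ∈ alive) ∨ (j+1 < n ∧ (i, j+1) ∈ alive))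
      then some (i, j) else none))

-- the `while True: new = {...}; if new == alive: break; alive = new` loop.
-- `fuel` only makes the recursion structural: the caller passes n*n+2, which the proofs
-- below show is never exhausted (each non-final round strictly grows the set of ≤ n*n cells).
def pvBLoop (position : List (List Int)) (color : Int) (n : Nat) :
    Nat → PySem.Set (Nat × Nat) → PySem.Set (Nat × Nat)
  | 0, alive => alive
  | fuel + 1, alive =>
    let new := pvBRound position color n alive
    if PySem.Set.equal new alive then alive else pvBLoop position color n fuel new

def remove_surrounded_alt (position : List (List Int)) (color : Int) : List (List Int) :=
  let n := position.length
  let alive := pvBLoop position color n (n * n + 2) []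
  position.mapIdx (fun i row => row.mapIdx (fun j v =>
    if j < n ∧ v = color ∧ (i, j) ∉ alive then 0 else v))

-- ===== PRECONDITION & SPEC =====
-- Pre_ excludes exactly the boards with a row shorter than the number of rows: there the Python
-- A (which scans the square len(position) x len(position)) raises IndexError.
def Pre_remove_surrounded (position : List (List Int)) (color : Int) : Prop :=
  ∀ row ∈ position, position.length ≤ row.length
instance (position : List (List Int)) (color : Int) : Decidable (Pre_remove_surrounded position color) := by
  unfold Pre_remove_surrounded; infer_instance

def pvWitness_remove_surrounded : List (List Int) × Int := ([[1, 0], [1, 2]], 1)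

def Spec_remove_surrounded (position : List (List Int)) (color : Int) (out : List (List Int)) : Prop := out = remove_surrounded_alt position color
instance (position : List (List Int)) (color : Int) (out : List (List Int)) : Decidable (Spec_remove_surrounded position color out) := by unfold Spec_remove_surrounded; infer_instance

-- ===== CLAIM (what is proved, stated in full; the proofs are below) =====
def Claim_equal_remove_surrounded : Prop := ∀ (position : List (List Int)) (color : Int), Dom_remove_surrounded position color → Pre_remove_surrounded position color → Spec_remove_surrounded position color (remove_surrounded position color)

-- ===== LEMMAS AND PROOFS =====

-- board predicates shared by both characterizations (n is always pos.length)
def pvCell (pos : List (List Int)) (color : Int) (x : Nat × Nat) : Prop :=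
  x.1 < pos.length ∧ x.2 < pos.length ∧ pvAt pos x.1 x.2 = color

-- the stone at x has an empty orthogonal neighbour (A's and B's liberty test verbatim)
def pvLib (pos : List (List Int)) (x : Nat × Nat) : Prop :=
  (0 < x.1 ∧ pvAt pos (x.1-1) x.2 = 0) ∨ (0 < x.2 ∧ pvAt pos x.1 (x.2-1) = 0) ∨
  (x.1+1 < pos.length ∧ pvAt pos (x.1+1) x.2 = 0) ∨ (x.2+1 < pos.length ∧ pvAt pos x.1 (x.2+1) = 0)

def pvAdj (pos : List (List Int)) (color : Int) (x y : Nat × Nat) : Prop :=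
  pvCell pos color x ∧ pvCell pos color y ∧
  ((0 < x.1 ∧ y = (x.1-1, x.2)) ∨ (0 < x.2 ∧ y = (x.1, x.2-1)) ∨
   y = (x.1+1, x.2) ∨ y = (x.1, x.2+1))

def pvReach (pos : List (List Int)) (color : Int) : Nat × Nat → Nat × Nat → Prop :=
  Relation.ReflTransGen (pvAdj pos color)

-- shape equality of two nested lists
def pvShape (pos g : List (List Int)) : Prop :=
  g.length = pos.length ∧ ∀ a, (g.getD a []).length = (pos.getD a []).length

-- number of unmarked grid cells (the flood loop's termination potential)
def pvU (pos g : List (List Int)) : Nat :=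
  (((Finset.range pos.length) ×ˢ (Finset.range pos.length)).filter
    (fun x => pvAt g x.1 x.2 = 0)).card

-- invariant of A's flood loop (M0 = cells marked before this group's flood started, z = seed)
structure FloodInv (pos : List (List Int)) (color : Int) (M0 : Nat × Nat → Prop) (z : Nat × Nat)
    (T C : List (Nat × Nat)) (g : List (List Int)) (b : Bool) : Prop where
  shape : pvShape pos g
  repr : ∀ x, pvAt g x.1 x.2 = 0 ↔ ¬(M0 x ∨ x ∈ C)
  tmem : ∀ x ∈ T, pvCell pos color x ∧ pvReach pos color z x
  cmem : ∀ x ∈ C, pvCell pos color x ∧ pvReach pos color z x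
  seed : z ∈ C ∨ z ∈ T
  closed : ∀ x ∈ C, ∀ y, pvAdj pos color x y → (y ∈ C ∨ y ∈ T)
  lib : b = true ↔ ∃ y ∈ C, pvLib pos y
  m0disj : ∀ x, pvCell pos color x → pvReach pos color z x → ¬ M0 x
  stack : ∀ pre t post, T = pre ++ t :: post → t ∈ C →
    ∀ y, pvAdj pos color t y → pvAt g y.1 y.2 = 0 → y ∈ pre
-- ---------- pvAt / pvSet2 toolbox ----------
theorem length_pvSet2 (m : List (List Int)) (i j : Nat) (v : Int) :
    (pvSet2 m i j v).length = m.length := by simp [pvSet2]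

theorem getD_pvSet2 (m : List (List Int)) (i j : Nat) (v : Int) (a : Nat) :
    (pvSet2 m i j v).getD a [] =
      if a = i ∧ i < m.length then (m.getD i []).set j v else m.getD a [] := by
  unfold pvSet2
  rw [List.getD_eq_getElem?_getD, List.getElem?_set]
  by_cases h1 : i = a
  · subst h1
    by_cases h2 : i < m.length
    · simp [h2, List.getD_eq_getElem?_getD]
    · simp [h2, List.getD_eq_getElem?_getD]
  · have hn : ¬(a = i ∧ i < m.length) := fun h => h1 h.1.symm
    simp [h1, hn, List.getD_eq_getElem?_getD]

theorem rowlen_pvSet2 (m : List (List Int)) (i j : Nat) (v : Int) (a : Nat) :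
    ((pvSet2 m i j v).getD a []).length = (m.getD a []).length := by
  rw [getD_pvSet2]; split
  · rename_i h; simp [h.1]
  · rfl

theorem shape_pvSet2 {pos m : List (List Int)} (h : pvShape pos m) (i j : Nat) (v : Int) :
    pvShape pos (pvSet2 m i j v) := by
  refine ⟨by rw [length_pvSet2]; exact h.1, fun a => ?_⟩
  rw [rowlen_pvSet2]; exact h.2 a

theorem pvAt_pvSet2_self {m : List (List Int)} {i j : Nat} (v : Int)
    (hi : i < m.length) (hj : j < (m.getD i []).length) :
    pvAt (pvSet2 m i j v) i j = v := by
  unfold pvAt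
  rw [getD_pvSet2, if_pos ⟨rfl, hi⟩, List.getD_eq_getElem?_getD, List.getElem?_set,
    if_pos rfl, if_pos (by simpa using hj)]
  rfl

theorem pvAt_pvSet2_ne {a b i j : Nat} (m : List (List Int)) (v : Int)
    (h : (a, b) ≠ (i, j)) : pvAt (pvSet2 m i j v) a b = pvAt m a b := by
  unfold pvAt
  rw [getD_pvSet2]
  split
  · rename_i hcase
    obtain ⟨rfl, hi⟩ := hcase
    have hbj : b ≠ j := fun hb => h (by simp [hb])
    rw [List.getD_eq_getElem?_getD, List.getElem?_set,
      if_neg (fun hh : j = b => hbj hh.symm), ← List.getD_eq_getElem?_getD]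
  · rfl

-- under Pre_, every grid cell is stored
theorem rowlen_ge {pos : List (List Int)} (hPre : ∀ row ∈ pos, pos.length ≤ row.length)
    {i : Nat} (hi : i < pos.length) : pos.length ≤ (pos.getD i []).length := by
  have h : pos.getD i [] = pos[i] := List.getD_eq_getElem pos [] hi
  rw [h]; exact hPre _ (pos.getElem_mem hi)

theorem shape_rowlen_ge {pos g : List (List Int)} (hs : pvShape pos g)
    (hPre : ∀ row ∈ pos, pos.length ≤ row.length) {i : Nat} (hi : i < pos.length) :
    pos.length ≤ (g.getD i []).length := by
  rw [hs.2 i]; exact rowlen_ge hPre hi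

-- ---------- grouped0: all-zero array of position's shape ----------
theorem zero_row_foldl (i : Nat) :
    ∀ (L : List Nat) (g : List (List Int)),
      (∀ b ∈ L, b < (g.getD i []).length) →
      ((L.foldl (fun g2 j => pvSet2 g2 i j 0) g).length = g.length ∧
        (∀ a, ((L.foldl (fun g2 j => pvSet2 g2 i j 0) g).getD a []).length = (g.getD a []).length)) ∧
      (∀ a b, pvAt (L.foldl (fun g2 j => pvSet2 g2 i j 0) g) a b =
        if a = i ∧ b ∈ L ∧ i < g.length then 0 else pvAt g a b) := by
  intro L
  induction L with
  | nil => intro g _; simp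
  | cons x xs ih =>
    intro g hL
    have hx : x < (g.getD i []).length := hL x (by simp)
    have hrec := ih (pvSet2 g i x 0) (by
      intro b hb; rw [rowlen_pvSet2]; exact hL b (by simp [hb]))
    simp only [List.foldl_cons]
    refine ⟨⟨by rw [hrec.1.1, length_pvSet2], fun a => by rw [hrec.1.2 a, rowlen_pvSet2]⟩, ?_⟩
    intro a b
    rw [hrec.2 a b, length_pvSet2]
    by_cases hai : a = i
    · subst hai
      by_cases hlen : a < g.length
      · by_cases hbx : b = x
        · subst hbx
          by_cases hmem : b ∈ xs
          · simp [hmem, hlen]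
          · simp [hmem, hlen, pvAt_pvSet2_self 0 hlen hx]
        · have he : pvAt (pvSet2 g a x 0) a b = pvAt g a b :=
            pvAt_pvSet2_ne g 0 (by simp [hbx])
          simp only [he]
          by_cases hmem : b ∈ xs <;> simp [hmem, hbx, hlen]
      · exfalso
        have hrow : g.getD a [] = [] := List.getD_eq_default _ _ (by omega)
        rw [hrow] at hx; simp at hx
    · have he : pvAt (pvSet2 g i x 0) a b = pvAt g a b :=
        pvAt_pvSet2_ne g 0 (by simp [hai])
      simp [hai, he]

theorem grouped0_char (pos : List (List Int)) :
    ∀ (L : List Nat) (g : List (List Int)),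
      ((L.foldl (fun g i => (List.range ((g.getD i []).length)).foldl
          (fun g2 j => pvSet2 g2 i j 0) g) g).length = g.length ∧
       (∀ a, ((L.foldl (fun g i => (List.range ((g.getD i []).length)).foldl
          (fun g2 j => pvSet2 g2 i j 0) g) g).getD a []).length = (g.getD a []).length)) ∧
      (∀ a b, pvAt (L.foldl (fun g i => (List.range ((g.getD i []).length)).foldl
          (fun g2 j => pvSet2 g2 i j 0) g) g) a b =
        if a ∈ L ∧ b < (g.getD a []).length ∧ a < g.length then 0 else pvAt g a b) := by
  intro L
  induction L with
  | nil => intro g; simp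
  | cons x xs ih =>
    intro g
    have hz := zero_row_foldl x (List.range ((g.getD x []).length)) g (by simp)
    set g1 := (List.range ((g.getD x []).length)).foldl (fun g2 j => pvSet2 g2 x j 0) g with hg1
    have hrec := ih g1
    simp only [List.foldl_cons]
    refine ⟨⟨by rw [hrec.1.1, hz.1.1], fun a => by rw [hrec.1.2 a, hz.1.2 a]⟩, ?_⟩
    intro a b
    rw [hrec.2 a b, hz.1.2 a, hz.1.1, hz.2 a b]
    split_ifs with h1 h2 h3 h4 h5 <;>
        simp only [List.mem_cons, List.mem_range] at * <;>
      first
        | rfl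
        | tauto
        | (exfalso
           first
             | (obtain ⟨rfl, hb', hl'⟩ := h3; exact h4 ⟨Or.inl rfl, hb', hl'⟩)
             | (rcases h5 with ⟨rfl | hmem', hb', hl'⟩
                · exact h3 ⟨rfl, hb', hl'⟩
                · exact h1 ⟨hmem', hb', hl'⟩))
-- ---------- adjacency and reachability ----------
theorem pvAdj_symm (pos : List (List Int)) (color : Int) : Symmetric (pvAdj pos color) := by
  rintro x y ⟨hx, hy, hgeo⟩
  refine ⟨hy, hx, ?_⟩
  rcases hgeo with ⟨h0, he⟩ | ⟨h0, he⟩ | he | he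
  · right; right; left
    subst he; cases x; simp at *; try omega
  · right; right; right
    subst he; cases x; simp at *; try omega
  · left
    subst he; cases x; simp at *; try omega
  · right; left
    subst he; cases x; simp at *; try omega

theorem pvReach_symm {pos : List (List Int)} {color : Int} {x y : Nat × Nat}
    (h : pvReach pos color x y) : pvReach pos color y x :=
  Relation.ReflTransGen.symmetric (pvAdj_symm pos color) h

theorem pvReach_trans {pos : List (List Int)} {color : Int} {x y w : Nat × Nat}
    (h1 : pvReach pos color x y) (h2 : pvReach pos color y w) : pvReach pos color x w :=
  Relation.ReflTransGen.trans h1 h2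

theorem pvReach_cell {pos : List (List Int)} {color : Int} {z x : Nat × Nat}
    (hz : pvCell pos color z) (h : pvReach pos color z x) : pvCell pos color x := by
  induction h with
  | refl => exact hz
  | tail _ hadj _ => exact hadj.2.1

-- ---------- one unfolding of the flood loop ----------
def pvPush (pos : List (List Int)) (color : Int) (n : Nat) (g' : List (List Int))
    (tup : Nat × Nat) : List (Nat × Nat) :=
  (if tup.2+1 < n ∧ pvAt pos tup.1 (tup.2+1) = color ∧ pvAt g' tup.1 (tup.2+1) = 0
     then [(tup.1, tup.2+1)] else []) ++
  (if tup.1+1 < n ∧ pvAt pos (tup.1+1) tup.2 = color ∧ pvAt g' (tup.1+1) tup.2 = 0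
     then [(tup.1+1, tup.2)] else []) ++
  (if 0 < tup.2 ∧ pvAt pos tup.1 (tup.2-1) = color ∧ pvAt g' tup.1 (tup.2-1) = 0
     then [(tup.1, tup.2-1)] else []) ++
  (if 0 < tup.1 ∧ pvAt pos (tup.1-1) tup.2 = color ∧ pvAt g' (tup.1-1) tup.2 = 0
     then [(tup.1-1, tup.2)] else [])

theorem length_pvPush (pos : List (List Int)) (color : Int) (n : Nat) (g' : List (List Int))
    (tup : Nat × Nat) : (pvPush pos color n g' tup).length ≤ 4 := by
  unfold pvPush; split_ifs <;> simp

theorem pvFlood_cons (pos : List (List Int)) (color : Int) (n fuel : Nat) (tup : Nat × Nat)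
    (T' C : List (Nat × Nat)) (g : List (List Int)) (b : Bool) :
    pvFlood pos color n (fuel+1) (tup::T') C g b =
      pvFlood pos color n fuel
        (pvPush pos color n (pvSet2 g tup.1 tup.2 1) tup ++ T') (C ++ [tup])
        (pvSet2 g tup.1 tup.2 1)
        (((b || decide (0 < tup.1 ∧ pvAt pos (tup.1-1) tup.2 = 0))
            || decide (0 < tup.2 ∧ pvAt pos tup.1 (tup.2-1) = 0))
            || decide (tup.1+1 < n ∧ pvAt pos (tup.1+1) tup.2 = 0)
            || decide (tup.2+1 < n ∧ pvAt pos tup.1 (tup.2+1) = 0)) := by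
  show pvFlood pos color n fuel _ _ _ _ = _
  congr 1
  unfold pvPush
  split_ifs <;> simp

theorem bool_lib_iff (pos : List (List Int)) (b : Bool) (tup : Nat × Nat) :
    ((((b || decide (0 < tup.1 ∧ pvAt pos (tup.1-1) tup.2 = 0))
        || decide (0 < tup.2 ∧ pvAt pos tup.1 (tup.2-1) = 0))
        || decide (tup.1+1 < pos.length ∧ pvAt pos (tup.1+1) tup.2 = 0)
        || decide (tup.2+1 < pos.length ∧ pvAt pos tup.1 (tup.2+1) = 0)) = true)
      ↔ (b = true ∨ pvLib pos tup) := by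
  simp [pvLib]; tauto

theorem mem_pvPush {pos : List (List Int)} {color : Int} {g' : List (List Int)}
    {tup : Nat × Nat} (hcell : pvCell pos color tup) (y : Nat × Nat) :
    y ∈ pvPush pos color pos.length g' tup ↔
      pvAdj pos color tup y ∧ pvAt g' y.1 y.2 = 0 := by
  obtain ⟨h1, h2, h3⟩ := hcell
  constructor
  · intro hy
    simp only [pvPush, List.mem_append] at hy
    rcases hy with ((hy | hy) | hy) | hy <;>
      [skip; skip; skip; skip] <;>
      · rw [List.mem_ite_nil_right, List.mem_singleton] at hy
        obtain ⟨⟨hb, hc, hg⟩, rfl⟩ := hy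
        refine ⟨⟨⟨h1, h2, h3⟩, ⟨by simp <;> omega, by simp <;> omega, by simpa using hc⟩, ?_⟩, by simpa using hg⟩
        simp [Prod.ext_iff] <;> omega
  · rintro ⟨⟨-, ⟨hy1, hy2, hyc⟩, hgeo⟩, hg⟩
    simp only [pvPush, List.mem_append, List.mem_ite_nil_right]
    rcases hgeo with ⟨h0, rfl⟩ | ⟨h0, rfl⟩ | rfl | rfl
    · exact Or.inr ⟨⟨h0, hyc, hg⟩, by simp⟩
    · exact Or.inl (Or.inr ⟨⟨h0, hyc, hg⟩, by simp⟩)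
    · exact Or.inl (Or.inl (Or.inr ⟨⟨by simpa using hy1, hyc, hg⟩, by simp⟩))
    · exact Or.inl (Or.inl (Or.inl ⟨⟨by simpa using hy2, hyc, hg⟩, by simp⟩))

-- ---------- the termination potential ----------
theorem pvU_le (pos g : List (List Int)) : pvU pos g ≤ pos.length * pos.length := by
  calc pvU pos g ≤ ((Finset.range pos.length) ×ˢ (Finset.range pos.length)).card :=
        Finset.card_filter_le _ _
    _ = pos.length * pos.length := by simp

theorem pvU_congr {pos g g' : List (List Int)}
    (h : ∀ x : Nat × Nat, pvAt g' x.1 x.2 = 0 ↔ pvAt g x.1 x.2 = 0) :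
    pvU pos g' = pvU pos g := by
  unfold pvU
  congr 1
  apply Finset.filter_congr
  intro x _
  simp [h x]

theorem pvU_mark {pos g : List (List Int)} {tup : Nat × Nat}
    (hs : pvShape pos g) (hPre : ∀ row ∈ pos, pos.length ≤ row.length)
    (h1 : tup.1 < pos.length) (h2 : tup.2 < pos.length)
    (h0 : pvAt g tup.1 tup.2 = 0) :
    pvU pos (pvSet2 g tup.1 tup.2 1) + 1 = pvU pos g := by
  have hlen : tup.1 < g.length := by rw [hs.1]; exact h1
  have hrow : tup.2 < (g.getD tup.1 []).length :=
    lt_of_lt_of_le h2 (shape_rowlen_ge hs hPre h1)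
  have hset : ((Finset.range pos.length) ×ˢ (Finset.range pos.length)).filter
      (fun x : Nat × Nat => pvAt (pvSet2 g tup.1 tup.2 1) x.1 x.2 = 0) =
      (((Finset.range pos.length) ×ˢ (Finset.range pos.length)).filter
        (fun x : Nat × Nat => pvAt g x.1 x.2 = 0)).erase tup := by
    ext x
    simp only [Finset.mem_erase, Finset.mem_filter, Finset.mem_product, Finset.mem_range]
    constructor
    · rintro ⟨hx, hg⟩
      have hne : x ≠ tup := by
        rintro rfl
        rw [pvAt_pvSet2_self 1 hlen hrow] at hg; exact one_ne_zero hg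
      refine ⟨hne, hx, ?_⟩
      rw [← pvAt_pvSet2_ne (a := x.1) (b := x.2) g 1 (by simpa [Prod.ext_iff] using hne)]
      exact hg
    · rintro ⟨hne, hx, hg⟩
      refine ⟨hx, ?_⟩
      rw [pvAt_pvSet2_ne (a := x.1) (b := x.2) g 1 (by simpa [Prod.ext_iff] using hne)]
      exact hg
  unfold pvU
  rw [hset, Finset.card_erase_of_mem]
  · have : tup ∈ ((Finset.range pos.length) ×ˢ (Finset.range pos.length)).filter
        (fun x : Nat × Nat => pvAt g x.1 x.2 = 0) := by
      simp only [Finset.mem_filter, Finset.mem_product, Finset.mem_range]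
      exact ⟨⟨h1, h2⟩, h0⟩
    have hpos : 0 < (((Finset.range pos.length) ×ˢ (Finset.range pos.length)).filter
        (fun x : Nat × Nat => pvAt g x.1 x.2 = 0)).card := Finset.card_pos.mpr ⟨tup, this⟩
    omega
  · simp only [Finset.mem_filter, Finset.mem_product, Finset.mem_range]
    exact ⟨⟨h1, h2⟩, h0⟩
-- membership in a list closed under adjacency propagates along reachability
theorem reach_mem_of_closed {pos : List (List Int)} {color : Int} {C : List (Nat × Nat)}
    {z x : Nat × Nat} (hz : z ∈ C)
    (hcl : ∀ a ∈ C, ∀ y, pvAdj pos color a y → y ∈ C)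
    (h : pvReach pos color z x) : x ∈ C := by
  induction h with
  | refl => exact hz
  | tail _ h2 ihh => exact hcl _ ihh _ h2

-- the flood loop computes: checked = the seed's group, grouped gains the group's marks,
-- liberties = some stone of the group has an empty neighbour
theorem pvFlood_spec (pos : List (List Int)) (color : Int)
    (hPre : ∀ row ∈ pos, pos.length ≤ row.length)
    (M0 : Nat × Nat → Prop) (z : Nat × Nat) :
    ∀ fuel T C g b, FloodInv pos color M0 z T C g b →
      4 * pvU pos g + T.length < fuel →
      (∀ x, x ∈ (pvFlood pos color pos.length fuel T C g b).1 ↔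
          pvCell pos color x ∧ pvReach pos color z x) ∧
      pvShape pos (pvFlood pos color pos.length fuel T C g b).2.1 ∧
      (∀ x, pvAt (pvFlood pos color pos.length fuel T C g b).2.1 x.1 x.2 = 0 ↔
          ¬(M0 x ∨ (pvCell pos color x ∧ pvReach pos color z x))) ∧
      ((pvFlood pos color pos.length fuel T C g b).2.2 = true ↔
          ∃ y, pvCell pos color y ∧ pvReach pos color z y ∧ pvLib pos y) := by
  intro fuel
  induction fuel with
  | zero => intro T C g b _ hf; omega
  | succ fuel ih =>
    intro T C g b hInv hf
    match T with
    | [] =>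
      have hseed : z ∈ C := by
        rcases hInv.seed with h | h
        · exact h
        · simp at h
      have hcl : ∀ a ∈ C, ∀ y, pvAdj pos color a y → y ∈ C := by
        intro a ha y hadj
        rcases hInv.closed a ha y hadj with h | h
        · exact h
        · simp at h
      have hCiff : ∀ x, x ∈ C ↔ pvCell pos color x ∧ pvReach pos color z x := by
        intro x
        constructor
        · exact hInv.cmem x
        · rintro ⟨-, hr⟩
          exact reach_mem_of_closed hseed hcl hr
      simp only [pvFlood]
      refine ⟨hCiff, hInv.shape, ?_, ?_⟩
      · intro x
        rw [hInv.repr x]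
        simp only [hCiff]
      · rw [hInv.lib]
        simp only [hCiff]
        constructor
        · rintro ⟨y, ⟨hc, hr⟩, hl⟩
          exact ⟨y, hc, hr, hl⟩
        · rintro ⟨y, hc, hr, hl⟩
          exact ⟨y, ⟨hc, hr⟩, hl⟩
    | tup :: T' =>
      obtain ⟨⟨ht1, ht2, ht3⟩, htr⟩ := hInv.tmem tup (by simp)
      have hg1 : tup.1 < g.length := by rw [hInv.shape.1]; exact ht1
      have hg2 : tup.2 < (g.getD tup.1 []).length :=
        lt_of_lt_of_le ht2 (shape_rowlen_ge hInv.shape hPre ht1)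
      rw [pvFlood_cons]
      set g' := pvSet2 g tup.1 tup.2 1 with hg'def
      have hat_self : pvAt g' tup.1 tup.2 = 1 := pvAt_pvSet2_self 1 hg1 hg2
      have hat_ne : ∀ y : Nat × Nat, y ≠ tup → pvAt g' y.1 y.2 = pvAt g y.1 y.2 := by
        intro y hy
        exact pvAt_pvSet2_ne g 1 (by simpa [Prod.ext_iff] using hy)
      have hshape' : pvShape pos g' := shape_pvSet2 hInv.shape _ _ _
      have hmemP : ∀ y, y ∈ pvPush pos color pos.length g' tup ↔
          pvAdj pos color tup y ∧ pvAt g' y.1 y.2 = 0 := mem_pvPush ⟨ht1, ht2, ht3⟩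
      set bb := (((b || decide (0 < tup.1 ∧ pvAt pos (tup.1-1) tup.2 = 0))
            || decide (0 < tup.2 ∧ pvAt pos tup.1 (tup.2-1) = 0))
            || decide (tup.1+1 < pos.length ∧ pvAt pos (tup.1+1) tup.2 = 0)
            || decide (tup.2+1 < pos.length ∧ pvAt pos tup.1 (tup.2+1) = 0)) with hbbdef
      have hbbiff : bb = true ↔ (b = true ∨ pvLib pos tup) := bool_lib_iff pos b tup
      by_cases hm : pvAt g tup.1 tup.2 = 0
      · -- tup pops unmarked: it is appended to checked, marked, its unmarked neighbours pushed
        have htnotC : ¬(M0 tup ∨ tup ∈ C) := (hInv.repr tup).mp hm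
        have hrepr' : ∀ x, pvAt g' x.1 x.2 = 0 ↔ ¬(M0 x ∨ x ∈ C ++ [tup]) := by
          intro x
          by_cases hx : x = tup
          · subst hx
            rw [hat_self]
            simp
          · rw [hat_ne x hx, hInv.repr x]
            simp [hx]
        have hInv' : FloodInv pos color M0 z (pvPush pos color pos.length g' tup ++ T')
            (C ++ [tup]) g' bb := by
          refine ⟨hshape', hrepr', ?_, ?_, ?_, ?_, ?_, hInv.m0disj, ?_⟩
          · -- tmem
            intro x hx
            rcases List.mem_append.mp hx with hx | hx
            · obtain ⟨hadj, -⟩ := (hmemP x).mp hx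
              exact ⟨hadj.2.1, htr.tail hadj⟩
            · exact hInv.tmem x (by simp [hx])
          · -- cmem
            intro x hx
            rcases List.mem_append.mp hx with hx | hx
            · exact hInv.cmem x hx
            · rw [List.mem_singleton] at hx
              rw [hx]
              exact ⟨⟨ht1, ht2, ht3⟩, htr⟩
          · -- seed
            rcases hInv.seed with h | h
            · exact Or.inl (List.mem_append_left _ h)
            · rcases List.mem_cons.mp h with h | h
              · exact Or.inl (List.mem_append_right _ (by simp [h]))
              · exact Or.inr (List.mem_append_right _ h)
          · -- closed
            intro x hx y hadj
            rcases List.mem_append.mp hx with hx | hx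
            · rcases hInv.closed x hx y hadj with h | h
              · exact Or.inl (List.mem_append_left _ h)
              · rcases List.mem_cons.mp h with h | h
                · exact Or.inl (List.mem_append_right _ (by simp [h]))
                · exact Or.inr (List.mem_append_right _ h)
            · rw [List.mem_singleton] at hx
              rw [hx] at hadj
              by_cases hy0 : pvAt g' y.1 y.2 = 0
              · exact Or.inr (List.mem_append_left _ ((hmemP y).mpr ⟨hadj, hy0⟩))
              · have hy' : M0 y ∨ y ∈ C ++ [tup] := by
                  have h2 := hrepr' y
                  tauto
                rcases hy' with hy' | hy'
                · exact absurd hy' (hInv.m0disj y hadj.2.1 (htr.tail hadj))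
                · exact Or.inl hy'
          · -- lib
            rw [hbbiff, hInv.lib]
            constructor
            · rintro (⟨y, hy, hl⟩ | hl)
              · exact ⟨y, List.mem_append_left _ hy, hl⟩
              · exact ⟨tup, List.mem_append_right _ (by simp), hl⟩
            · rintro ⟨y, hy, hl⟩
              rcases List.mem_append.mp hy with hy | hy
              · exact Or.inl ⟨y, hy, hl⟩
              · rw [List.mem_singleton] at hy
                rw [hy] at hl
                exact Or.inr hl
          · -- stack
            intro pre t post hTeq htC y hadj hy0
            have hyne : y ≠ tup := by
              intro h; rw [h, hat_self] at hy0; exact one_ne_zero hy0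
            have hyg : pvAt g y.1 y.2 = 0 := by rw [← hat_ne y hyne]; exact hy0
            have hmain : ∀ a', pre = pvPush pos color pos.length g' tup ++ a' →
                T' = a' ++ t :: post → y ∈ pre := by
              intro a' hpre hT'
              rcases List.mem_append.mp htC with htC' | htC'
              · have hold := hInv.stack (tup :: a') t post (by rw [hT']; rfl) htC' y hadj hyg
                rcases List.mem_cons.mp hold with h | h
                · exact absurd h hyne
                · rw [hpre]; exact List.mem_append_right _ h
              · rw [List.mem_singleton] at htC'; subst htC'
                rw [hpre]
                exact List.mem_append_left _ ((hmemP y).mpr ⟨hadj, hy0⟩)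
            rcases List.append_eq_append_iff.mp hTeq with ⟨a', ha1, ha2⟩ | ⟨c', hc1, hc2⟩
            · exact hmain a' ha1 ha2
            · match c', hc2 with
              | [], hc2 => exact hmain [] (by simp [hc1]) (by simpa using hc2.symm)
              | q :: rest, hc2 =>
                exfalso
                have hqP : t ∈ pvPush pos color pos.length g' tup := by
                  rw [hc1]
                  refine List.mem_append_right _ ?_
                  have : t = q := by
                    have := congrArg (fun l => l.head?) hc2
                    simp at this
                    exact this
                  simp [this]
                have := ((hmemP t).mp hqP).2
                rcases List.mem_append.mp htC with htC' | htC'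
                · rw [hrepr' t] at this
                  exact this (Or.inr (List.mem_append_left _ htC'))
                · rw [List.mem_singleton] at htC'; subst htC'
                  rw [hat_self] at this
                  exact one_ne_zero this
        have humark : pvU pos g' + 1 = pvU pos g :=
          pvU_mark hInv.shape hPre ht1 ht2 hm
        refine ih _ _ _ _ hInv' ?_
        have hP4 := length_pvPush pos color pos.length g' tup
        rw [List.length_append]
        simp only [List.length_cons] at hf
        omega
      · -- tup pops already marked: by the stack invariant it pushes nothing
        have htupC : tup ∈ C := by
          have h := hInv.repr tup
          have : M0 tup ∨ tup ∈ C := by tauto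
          rcases this with h' | h'
          · exact absurd h' (hInv.m0disj tup ⟨ht1, ht2, ht3⟩ htr)
          · exact h'
        have hstack0 := hInv.stack [] tup T' (by simp) htupC
        have hPnil : pvPush pos color pos.length g' tup = [] := by
          rw [List.eq_nil_iff_forall_not_mem]
          intro y hy
          obtain ⟨hadj, hy0⟩ := (hmemP y).mp hy
          have hyne : y ≠ tup := by
            intro h; rw [h, hat_self] at hy0; exact one_ne_zero hy0
          have hyg : pvAt g y.1 y.2 = 0 := by rw [← hat_ne y hyne]; exact hy0
          simpa using hstack0 y hadj hyg
        have hrepr' : ∀ x, pvAt g' x.1 x.2 = 0 ↔ ¬(M0 x ∨ x ∈ C ++ [tup]) := by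
          intro x
          by_cases hx : x = tup
          · subst hx
            rw [hat_self]
            simp [htupC]
          · rw [hat_ne x hx, hInv.repr x]
            simp [hx]
        have hInv' : FloodInv pos color M0 z (pvPush pos color pos.length g' tup ++ T')
            (C ++ [tup]) g' bb := by
          rw [hPnil, List.nil_append]
          refine ⟨hshape', hrepr', ?_, ?_, ?_, ?_, ?_, hInv.m0disj, ?_⟩
          · intro x hx; exact hInv.tmem x (by simp [hx])
          · intro x hx
            rcases List.mem_append.mp hx with hx | hx
            · exact hInv.cmem x hx
            · rw [List.mem_singleton] at hx
              rw [hx]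
              exact ⟨⟨ht1, ht2, ht3⟩, htr⟩
          · rcases hInv.seed with h | h
            · exact Or.inl (List.mem_append_left _ h)
            · rcases List.mem_cons.mp h with h | h
              · exact Or.inl (List.mem_append_right _ (by simp [h]))
              · exact Or.inr h
          · intro x hx y hadj
            have hxC : x ∈ C := by
              rcases List.mem_append.mp hx with hx | hx
              · exact hx
              · rw [List.mem_singleton] at hx; subst hx; exact htupC
            rcases hInv.closed x hxC y hadj with h | h
            · exact Or.inl (List.mem_append_left _ h)
            · rcases List.mem_cons.mp h with h | h
              · exact Or.inl (List.mem_append_right _ (by simp [h]))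
              · exact Or.inr h
          · rw [hbbiff, hInv.lib]
            constructor
            · rintro (⟨y, hy, hl⟩ | hl)
              · exact ⟨y, List.mem_append_left _ hy, hl⟩
              · exact ⟨tup, List.mem_append_left _ htupC, hl⟩
            · rintro ⟨y, hy, hl⟩
              rcases List.mem_append.mp hy with hy | hy
              · exact Or.inl ⟨y, hy, hl⟩
              · rw [List.mem_singleton] at hy
                rw [hy] at hl
                exact Or.inl ⟨tup, htupC, hl⟩
          · intro pre t post hTeq htC y hadj hy0
            have hyne : y ≠ tup := by
              intro h; rw [h, hat_self] at hy0; exact one_ne_zero hy0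
            have hyg : pvAt g y.1 y.2 = 0 := by rw [← hat_ne y hyne]; exact hy0
            have htC' : t ∈ C := by
              rcases List.mem_append.mp htC with h | h
              · exact h
              · rw [List.mem_singleton] at h; subst h; exact htupC
            have hold := hInv.stack (tup :: pre) t post (by rw [hTeq]; rfl) htC' y hadj hyg
            rcases List.mem_cons.mp hold with h | h
            · exact absurd h hyne
            · exact h
        have hueq : pvU pos g' = pvU pos g := by
          apply pvU_congr
          intro x
          by_cases hx : x = tup
          · subst hx
            rw [hat_self]
            constructor
            · intro h; exact absurd h one_ne_zero
            · intro h; exact absurd h hm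
          · rw [hat_ne x hx]
        refine ih _ _ _ _ hInv' ?_
        rw [hPnil]
        simp only [List.nil_append, List.length_cons] at hf ⊢
        omega
-- ---------- proof-side views of A's outer double loop ----------
def pvDead (pos : List (List Int)) (color : Int) (x : Nat × Nat) : Prop :=
  ∀ y, pvReach pos color x y → ¬ pvLib pos y

def pvMarked (pos : List (List Int)) (color : Int) (P : List (Nat × Nat)) (x : Nat × Nat) : Prop :=
  ∃ s ∈ P, pvCell pos color s ∧ pvReach pos color s x

def pvCellsL (pos : List (List Int)) : List (Nat × Nat) :=
  (List.range pos.length).flatMap (fun i => (List.range pos.length).map (fun j => (i, j)))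

def pvGrouped0 (pos : List (List Int)) : List (List Int) :=
  (List.range pos.length).foldl (fun g i =>
    (List.range ((g.getD i []).length)).foldl (fun g2 j => pvSet2 g2 i j 0) g) pos

def pvStep (pos : List (List Int)) (color : Int)
    (st : List (List Int) × List (List Int)) (z : Nat × Nat) :
    List (List Int) × List (List Int) :=
  if pvAt pos z.1 z.2 = color ∧ pvAt st.1 z.1 z.2 = 0 then
    let r := pvFlood pos color pos.length (4*pos.length*pos.length+2) [z] [] st.1 false
    if r.2.2 = false then
      (r.2.1, r.1.foldl (fun np t => pvSet2 np t.1 t.2 0) st.2)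
    else (r.2.1, st.2)
  else st

theorem remove_surrounded_eq (pos : List (List Int)) (color : Int) :
    remove_surrounded pos color =
      ((pvCellsL pos).foldl (pvStep pos color) (pvGrouped0 pos, pos)).2 := rfl

theorem mem_pvCellsL (pos : List (List Int)) (x : Nat × Nat) :
    x ∈ pvCellsL pos ↔ x.1 < pos.length ∧ x.2 < pos.length := by
  cases x
  simp [pvCellsL]

theorem pvAt_out_of_range {pos : List (List Int)} {a b : Nat}
    (h : ¬(a < pos.length ∧ b < (pos.getD a []).length)) : pvAt pos a b = 0 := by
  unfold pvAt
  rcases not_and_or.mp h with h | h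
  · have h1 : pos.getD a [] = [] := List.getD_eq_default _ _ (by omega)
    rw [h1]; rfl
  · exact List.getD_eq_default _ _ (by omega)

theorem pvGrouped0_spec (pos : List (List Int)) :
    pvShape pos (pvGrouped0 pos) ∧ ∀ x : Nat × Nat, pvAt (pvGrouped0 pos) x.1 x.2 = 0 := by
  have h := grouped0_char pos (List.range pos.length) pos
  refine ⟨⟨h.1.1, h.1.2⟩, ?_⟩
  rintro ⟨a, b⟩
  show pvAt (pvGrouped0 pos) a b = 0
  unfold pvGrouped0
  rw [h.2 a b]
  split
  · rfl
  · rename_i hc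
    apply pvAt_out_of_range
    intro hab
    by_cases ha : a < pos.length
    · exact hc ⟨List.mem_range.mpr ha, hab.2, ha⟩
    · exact ha hab.1

-- invariant of the outer i,j scan: P = cells already scanned
structure ScanInv (pos : List (List Int)) (color : Int) (P : List (Nat × Nat))
    (g np : List (List Int)) : Prop where
  gshape : pvShape pos g
  grepr : ∀ x, pvAt g x.1 x.2 = 0 ↔ ¬ pvMarked pos color P x
  npshape : pvShape pos np
  npzero : ∀ x : Nat × Nat,
    (pvMarked pos color P x ∧ pvDead pos color x → pvAt np x.1 x.2 = 0) ∧
    (¬(pvMarked pos color P x ∧ pvDead pos color x) → pvAt np x.1 x.2 = pvAt pos x.1 x.2)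

theorem pvMarked_snoc (pos : List (List Int)) (color : Int) (P : List (Nat × Nat))
    (z x : Nat × Nat) :
    pvMarked pos color (P ++ [z]) x ↔
      pvMarked pos color P x ∨ (pvCell pos color z ∧ pvReach pos color z x) := by
  unfold pvMarked
  simp only [List.mem_append, List.mem_singleton]
  constructor
  · rintro ⟨s, hs | rfl, hc, hr⟩
    · exact Or.inl ⟨s, hs, hc, hr⟩
    · exact Or.inr ⟨hc, hr⟩
  · rintro (⟨s, hs, hc, hr⟩ | ⟨hc, hr⟩)
    · exact ⟨s, Or.inl hs, hc, hr⟩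
    · exact ⟨z, Or.inr rfl, hc, hr⟩

theorem zero_cells_foldl (pos : List (List Int))
    (hPre : ∀ row ∈ pos, pos.length ≤ row.length) :
    ∀ (L : List (Nat × Nat)) (np : List (List Int)),
      (∀ t ∈ L, t.1 < pos.length ∧ t.2 < pos.length) → pvShape pos np →
      pvShape pos (L.foldl (fun np t => pvSet2 np t.1 t.2 0) np) ∧
      (∀ x : Nat × Nat, pvAt (L.foldl (fun np t => pvSet2 np t.1 t.2 0) np) x.1 x.2 =
        if x ∈ L then 0 else pvAt np x.1 x.2) := by
  intro L
  induction L with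
  | nil => intro np _ hs; simpa using hs
  | cons t L' ih =>
    intro np hb hs
    have ht := hb t (by simp)
    have h1 : t.1 < np.length := by rw [hs.1]; exact ht.1
    have h2 : t.2 < (np.getD t.1 []).length := lt_of_lt_of_le ht.2 (shape_rowlen_ge hs hPre ht.1)
    have hrec := ih (pvSet2 np t.1 t.2 0) (fun u hu => hb u (by simp [hu]))
      (shape_pvSet2 hs _ _ _)
    simp only [List.foldl_cons]
    refine ⟨hrec.1, ?_⟩
    intro x
    rw [hrec.2 x]
    by_cases hx : x ∈ L'
    · simp [hx]
    · by_cases hxt : x = t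
      · subst hxt
        simp [hx, pvAt_pvSet2_self 0 h1 h2]
      · rw [pvAt_pvSet2_ne np 0 (by simpa [Prod.ext_iff] using hxt)]
        simp [hx, hxt]

theorem pvDead_transfer {pos : List (List Int)} {color : Int} {z x : Nat × Nat}
    (hr : pvReach pos color z x) (hd : pvDead pos color z) : pvDead pos color x := by
  intro y hy
  exact hd y (pvReach_trans hr hy)

theorem pvDead_transfer' {pos : List (List Int)} {color : Int} {z x : Nat × Nat}
    (hr : pvReach pos color z x) (hd : pvDead pos color x) : pvDead pos color z :=
  pvDead_transfer (pvReach_symm hr) hd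

theorem scan_foldl (pos : List (List Int)) (color : Int)
    (hPre : ∀ row ∈ pos, pos.length ≤ row.length) :
    ∀ (L P : List (Nat × Nat)) (g np : List (List Int)), ScanInv pos color P g np →
      (∀ z ∈ L, z.1 < pos.length ∧ z.2 < pos.length) →
      ScanInv pos color (P ++ L)
        (L.foldl (pvStep pos color) (g, np)).1 (L.foldl (pvStep pos color) (g, np)).2 := by
  intro L
  induction L with
  | nil => intro P g np hInv _; simpa using hInv
  | cons z L' ih =>
    intro P g np hInv hbound
    obtain ⟨hz1, hz2⟩ := hbound z (by simp)
    simp only [List.foldl_cons]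
    have hassoc : P ++ z :: L' = (P ++ [z]) ++ L' := by simp
    rw [hassoc]
    by_cases hcz : pvAt pos z.1 z.2 = color ∧ pvAt g z.1 z.2 = 0
    · -- unseen stone of our colour: flood its group
      have hcellz : pvCell pos color z := ⟨hz1, hz2, hcz.1⟩
      have hInv0 : FloodInv pos color (pvMarked pos color P) z [z] [] g false := by
        refine ⟨hInv.gshape, ?_, ?_, by simp, by simp, by simp, by simp, ?_, by simp⟩
        · intro x; rw [hInv.grepr x]; simp
        · intro x hx
          rw [List.mem_singleton] at hx
          rw [hx]
          exact ⟨hcellz, Relation.ReflTransGen.refl⟩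
        · intro x hcx hrx ⟨s, hs, hcs, hrs⟩
          have : pvMarked pos color P z := ⟨s, hs, hcs, pvReach_trans hrs (pvReach_symm hrx)⟩
          exact ((hInv.grepr z).mp hcz.2) this
      have hfl := pvFlood_spec pos color hPre (pvMarked pos color P) z
        (4*pos.length*pos.length+2) [z] [] g false hInv0
        (by
          have h1 := pvU_le pos g
          have h2 : 4*pos.length*pos.length = 4*(pos.length*pos.length) := by ring
          simp only [List.length_singleton]
          omega)
      set r := pvFlood pos color pos.length (4*pos.length*pos.length+2) [z] [] g false with hrdef
      obtain ⟨hmem, hshape1, hrepr1, hlib1⟩ := hfl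
      have hstep : pvStep pos color (g, np) z =
          if r.2.2 = false then
            (r.2.1, r.1.foldl (fun np t => pvSet2 np t.1 t.2 0) np)
          else (r.2.1, np) := by
        simp only [pvStep, hcz, and_self, if_true]
        rw [← hrdef]
      have hgrepr' : ∀ x, pvAt r.2.1 x.1 x.2 = 0 ↔ ¬ pvMarked pos color (P ++ [z]) x := by
        intro x
        rw [hrepr1 x, pvMarked_snoc]
        constructor
        · intro h
          rintro (h1 | ⟨-, h2⟩)
          · exact h (Or.inl h1)
          · exact h (Or.inr ⟨pvReach_cell hcellz h2, h2⟩)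
        · intro h
          rintro (h1 | ⟨-, h2⟩)
          · exact h (Or.inl h1)
          · exact h (Or.inr ⟨hcellz, h2⟩)
      by_cases hlb : r.2.2 = false
      · -- no liberties: the whole group is erased from new_position
        have hdeadz : pvDead pos color z := by
          intro y hy hl
          have : r.2.2 = true := hlib1.mpr ⟨y, pvReach_cell hcellz hy, hy, hl⟩
          rw [hlb] at this; exact Bool.false_ne_true this
        rw [hstep, if_pos hlb]
        have hzf := zero_cells_foldl pos hPre r.1 np
          (fun t ht => by
            have := (hmem t).mp ht
            exact ⟨this.1.1, this.1.2.1⟩) hInv.npshape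
        refine ih (P ++ [z]) _ _ ⟨hshape1, hgrepr', hzf.1, ?_⟩
          (fun u hu => hbound u (by simp [hu]))
        intro x
        rw [hzf.2 x]
        by_cases hxr : x ∈ r.1
        · obtain ⟨hcx, hrx⟩ := (hmem x).mp hxr
          simp only [hxr, if_true]
          constructor
          · intro _; trivial
          · intro hcon
            exfalso
            exact hcon ⟨(pvMarked_snoc pos color P z x).mpr (Or.inr ⟨hcellz, hrx⟩),
              pvDead_transfer hrx hdeadz⟩
        · simp only [hxr, if_false]
          have hnotz : ¬(pvCell pos color z ∧ pvReach pos color z x) := by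
            rintro ⟨-, hr2⟩
            exact hxr ((hmem x).mpr ⟨pvReach_cell hcellz hr2, hr2⟩)
          constructor
          · rintro ⟨hmk, hdd⟩
            rcases (pvMarked_snoc pos color P z x).mp hmk with h1 | h1
            · exact (hInv.npzero x).1 ⟨h1, hdd⟩
            · exact absurd h1 hnotz
          · intro hcon
            refine (hInv.npzero x).2 ?_
            rintro ⟨hmk, hdd⟩
            exact hcon ⟨(pvMarked_snoc pos color P z x).mpr (Or.inl hmk), hdd⟩
      · -- liberties found: new_position untouched
        have hlivez : ¬ pvDead pos color z := by
          have : r.2.2 = true := by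
            cases h : r.2.2
            · exact absurd h hlb
            · rfl
          obtain ⟨y, -, hry, hly⟩ := hlib1.mp this
          intro hd
          exact hd y hry hly
        rw [hstep, if_neg hlb]
        refine ih (P ++ [z]) _ _ ⟨hshape1, hgrepr', hInv.npshape, ?_⟩
          (fun u hu => hbound u (by simp [hu]))
        intro x
        have hiff : (pvMarked pos color (P ++ [z]) x ∧ pvDead pos color x) ↔
            (pvMarked pos color P x ∧ pvDead pos color x) := by
          constructor
          · rintro ⟨hmk, hdd⟩
            rcases (pvMarked_snoc pos color P z x).mp hmk with h1 | h1
            · exact ⟨h1, hdd⟩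
            · exact absurd (pvDead_transfer' h1.2 hdd) hlivez
          · rintro ⟨hmk, hdd⟩
            exact ⟨(pvMarked_snoc pos color P z x).mpr (Or.inl hmk), hdd⟩
        constructor
        · intro h; exact (hInv.npzero x).1 (hiff.mp h)
        · intro h; exact (hInv.npzero x).2 (fun hc => h (hiff.mpr hc))
    · -- skipped cell: either wrong colour or already grouped
      have hstep : pvStep pos color (g, np) z = (g, np) := by
        simp only [pvStep, hcz, if_false]
      rw [hstep]
      have hmk_eq : ∀ x, pvMarked pos color (P ++ [z]) x ↔ pvMarked pos color P x := by
        intro x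
        rw [pvMarked_snoc]
        constructor
        · rintro (h | ⟨hcz', hrz⟩)
          · exact h
          · -- z is a colour cell already marked (else hcz would hold)
            have hmz : pvMarked pos color P z := by
              by_contra hmz
              exact hcz ⟨hcz'.2.2, (hInv.grepr z).mpr hmz⟩
            obtain ⟨s, hs, hcs, hrs⟩ := hmz
            exact ⟨s, hs, hcs, pvReach_trans hrs hrz⟩
        · exact Or.inl
      refine ih (P ++ [z]) _ _ ⟨hInv.gshape, ?_, hInv.npshape, ?_⟩
        (fun u hu => hbound u (by simp [hu]))
      · intro x
        rw [hInv.grepr x, hmk_eq x]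
      · intro x
        rw [show (pvMarked pos color (P ++ [z]) x ∧ pvDead pos color x) ↔
            (pvMarked pos color P x ∧ pvDead pos color x) from
          and_congr_left (fun _ => hmk_eq x)]
        exact hInv.npzero x
-- ---------- B side: the chaotic-iteration fixpoint ----------
-- proof-side view: the k-th iterate of the round function from the empty set
def pvBIter (position : List (List Int)) (color : Int) (n : Nat) : Nat → PySem.Set (Nat × Nat)
  | 0 => []
  | k + 1 => pvBRound position color n (pvBIter position color n k)

theorem set_equal_iff (A B : PySem.Set (Nat × Nat)) :
    PySem.Set.equal A B = true ↔ (∀ x : Nat × Nat, x ∈ A ↔ x ∈ B) := by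
  simp [PySem.Set.equal, PySem.Set.issubset]
  constructor
  · rintro ⟨h1, h2⟩ a b
    exact ⟨h1 a b, h2 a b⟩
  · intro h
    exact ⟨fun a b => (h a b).mp, fun a b => (h a b).mpr⟩

def pvAlive (pos : List (List Int)) (color : Int) (x : Nat × Nat) : Prop :=
  ∃ y, pvReach pos color x y ∧ pvLib pos y

def pvCond (pos : List (List Int)) (color : Int) (n : Nat) (alive : List (Nat × Nat))
    (i j : Nat) : Prop :=
  pvAt pos i j = color ∧
    ((0 < i ∧ pvAt pos (i-1) j = 0) ∨ (0 < j ∧ pvAt pos i (j-1) = 0) ∨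
     (i+1 < n ∧ pvAt pos (i+1) j = 0) ∨ (j+1 < n ∧ pvAt pos i (j+1) = 0) ∨
     (0 < i ∧ (i-1, j) ∈ alive) ∨ (0 < j ∧ (i, j-1) ∈ alive) ∨
     (i+1 < n ∧ (i+1, j) ∈ alive) ∨ (j+1 < n ∧ (i, j+1) ∈ alive))

theorem mem_pvBRound (pos : List (List Int)) (color : Int) (n : Nat)
    (alive : PySem.Set (Nat × Nat)) (x : Nat × Nat) :
    x ∈ pvBRound pos color n alive ↔
      x.1 < n ∧ x.2 < n ∧ pvCond pos color n alive x.1 x.2 := by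
  obtain ⟨i, j⟩ := x
  rw [pvBRound, PySem.Set.mem_ofList]
  simp only [List.mem_flatMap, List.mem_filterMap, List.mem_range, Option.ite_none_right_eq_some,
    Option.some.injEq, pvCond]
  constructor
  · rintro ⟨a, ha, b, hb, hcond, heq⟩
    obtain ⟨rfl, rfl⟩ := Prod.mk.injEq .. ▸ heq
    exact ⟨ha, hb, hcond⟩
  · rintro ⟨hi, hj, hcond⟩
    exact ⟨i, hi, j, hj, hcond, rfl⟩

theorem pvBRound_mono (pos : List (List Int)) (color : Int) (n : Nat)
    {A1 A2 : PySem.Set (Nat × Nat)} (h : ∀ y : Nat × Nat, y ∈ A1 → y ∈ A2) :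
    ∀ x, x ∈ pvBRound pos color n A1 → x ∈ pvBRound pos color n A2 := by
  intro x hx
  rw [mem_pvBRound] at hx ⊢
  obtain ⟨h1, h2, hc, hd⟩ := hx
  refine ⟨h1, h2, hc, ?_⟩
  rcases hd with hl | hl | hl | hl | ⟨hb, hm⟩ | ⟨hb, hm⟩ | ⟨hb, hm⟩ | ⟨hb, hm⟩
  · exact Or.inl hl
  · exact Or.inr (Or.inl hl)
  · exact Or.inr (Or.inr (Or.inl hl))
  · exact Or.inr (Or.inr (Or.inr (Or.inl hl)))
  · exact Or.inr (Or.inr (Or.inr (Or.inr (Or.inl ⟨hb, h _ hm⟩))))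
  · exact Or.inr (Or.inr (Or.inr (Or.inr (Or.inr (Or.inl ⟨hb, h _ hm⟩)))))
  · exact Or.inr (Or.inr (Or.inr (Or.inr (Or.inr (Or.inr (Or.inl ⟨hb, h _ hm⟩))))))
  · exact Or.inr (Or.inr (Or.inr (Or.inr (Or.inr (Or.inr (Or.inr ⟨hb, h _ hm⟩))))))

theorem pvBRound_congr (pos : List (List Int)) (color : Int) (n : Nat)
    {A1 A2 : PySem.Set (Nat × Nat)} (h : ∀ y : Nat × Nat, y ∈ A1 ↔ y ∈ A2) :
    pvBRound pos color n A1 = pvBRound pos color n A2 := by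
  unfold pvBRound
  congr 1
  apply List.flatMap_congr
  intro i _
  apply List.filterMap_congr
  intro j _
  have hiff : (pvAt pos i j = color ∧
      ((0 < i ∧ pvAt pos (i-1) j = 0) ∨ (0 < j ∧ pvAt pos i (j-1) = 0) ∨
       (i+1 < n ∧ pvAt pos (i+1) j = 0) ∨ (j+1 < n ∧ pvAt pos i (j+1) = 0) ∨
       (0 < i ∧ (i-1, j) ∈ A1) ∨ (0 < j ∧ (i, j-1) ∈ A1) ∨
       (i+1 < n ∧ (i+1, j) ∈ A1) ∨ (j+1 < n ∧ (i, j+1) ∈ A1))) ↔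
      (pvAt pos i j = color ∧
      ((0 < i ∧ pvAt pos (i-1) j = 0) ∨ (0 < j ∧ pvAt pos i (j-1) = 0) ∨
       (i+1 < n ∧ pvAt pos (i+1) j = 0) ∨ (j+1 < n ∧ pvAt pos i (j+1) = 0) ∨
       (0 < i ∧ (i-1, j) ∈ A2) ∨ (0 < j ∧ (i, j-1) ∈ A2) ∨
       (i+1 < n ∧ (i+1, j) ∈ A2) ∨ (j+1 < n ∧ (i, j+1) ∈ A2))) := by
    simp only [h]
  exact if_congr hiff rfl rfl

theorem pvBIter_chain (pos : List (List Int)) (color : Int) (n : Nat) :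
    ∀ k x, x ∈ pvBIter pos color n k → x ∈ pvBIter pos color n (k+1) := by
  intro k
  induction k with
  | zero => intro x hx; simp [pvBIter] at hx
  | succ k ih =>
    intro x hx
    rw [pvBIter] at hx
    rw [show pvBIter pos color n (k+1+1) = pvBRound pos color n (pvBIter pos color n (k+1))
      from rfl]
    exact pvBRound_mono pos color n ih x hx

theorem pvBIter_grid (pos : List (List Int)) (color : Int) (n : Nat) :
    ∀ k, (pvBIter pos color n k).toFinset ⊆ (Finset.range n) ×ˢ (Finset.range n) := by
  intro k x hx
  rw [List.mem_toFinset] at hx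
  match k with
  | 0 => simp [pvBIter] at hx
  | k+1 =>
    rw [pvBIter, mem_pvBRound] at hx
    simp only [Finset.mem_product, Finset.mem_range]
    exact ⟨hx.1, hx.2.1⟩

theorem pvBIter_stab (pos : List (List Int)) (color : Int) (n : Nat) :
    ∃ K, K ≤ n*n+1 ∧ ∀ m, K ≤ m → pvBIter pos color n m = pvBIter pos color n K := by
  have hgrow : (∀ k, k ≤ n*n → (pvBIter pos color n (k+1)).toFinset ≠ (pvBIter pos color n k).toFinset) → False := by
    intro h
    have hcard : ∀ k, k ≤ n*n+1 → k ≤ (pvBIter pos color n k).toFinset.card := by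
      intro k
      induction k with
      | zero => intro _; omega
      | succ k ihk =>
        intro hk
        have hne := h k (by omega)
        have hsub : (pvBIter pos color n k).toFinset ⊆ (pvBIter pos color n (k+1)).toFinset := by
          intro x hx
          rw [List.mem_toFinset] at hx ⊢
          exact pvBIter_chain pos color n k x hx
        have hss : (pvBIter pos color n k).toFinset ⊂ (pvBIter pos color n (k+1)).toFinset :=
          ssubset_of_subset_of_ne hsub (fun he => hne he.symm)
        have := Finset.card_lt_card hss
        have := ihk (by omega)
        omega
    have h1 := hcard (n*n+1) le_rfl
    have h2 := Finset.card_le_card (pvBIter_grid pos color n (n*n+1))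
    simp only [Finset.card_product, Finset.card_range] at h2
    omega
  have hex : ∃ k, k ≤ n*n ∧ (pvBIter pos color n (k+1)).toFinset = (pvBIter pos color n k).toFinset := by
    by_contra hno
    exact hgrow (fun k hk he => hno ⟨k, hk, he⟩)
  obtain ⟨k, hk, heq⟩ := hex
  have hiff : ∀ x : Nat × Nat, x ∈ pvBIter pos color n (k+1) ↔ x ∈ pvBIter pos color n k := by
    intro x
    rw [← List.mem_toFinset, ← List.mem_toFinset (l := pvBIter pos color n k), heq]
  have hstab : ∀ m, pvBIter pos color n (k+1+m) = pvBIter pos color n (k+1) := by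
    intro m
    induction m with
    | zero => rfl
    | succ m ihm =>
      have h1 : pvBIter pos color n (k+1+(m+1)) = pvBRound pos color n (pvBIter pos color n (k+1+m)) := rfl
      rw [h1, ihm, pvBRound_congr pos color n hiff]
      rfl
  refine ⟨k+1, by omega, ?_⟩
  intro m hm
  have h2 := hstab (m - (k+1))
  rw [show k+1+(m-(k+1)) = m by omega] at h2
  exact h2

theorem pvBIter_fix (pos : List (List Int)) (color : Int) (n : Nat) :
    pvBRound pos color n (pvBIter pos color n (n*n+1)) = pvBIter pos color n (n*n+1) := by
  obtain ⟨K, hK, hstab⟩ := pvBIter_stab pos color n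
  have hdef : pvBRound pos color n (pvBIter pos color n (n*n+1)) = pvBIter pos color n (n*n+1+1) := rfl
  rw [hdef, hstab (n*n+1+1) (by omega), hstab (n*n+1) hK]

-- the while-loop of B computes (memberwise) the (n*n+1)-st iterate
theorem pvBLoop_mem (pos : List (List Int)) (color : Int) (n : Nat) :
    ∀ fuel j, n*n+1 ≤ j + fuel →
      ∀ x : Nat × Nat, x ∈ pvBLoop pos color n fuel (pvBIter pos color n j) ↔
        x ∈ pvBIter pos color n (n*n+1) := by
  obtain ⟨K, hK, hstab⟩ := pvBIter_stab pos color n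
  intro fuel
  induction fuel with
  | zero =>
    intro j hj x
    show x ∈ pvBIter pos color n j ↔ _
    rw [hstab j (by omega), hstab (n*n+1) hK]
  | succ fuel ihf =>
    intro j hj x
    simp only [pvBLoop]
    by_cases he : PySem.Set.equal (pvBRound pos color n (pvBIter pos color n j))
        (pvBIter pos color n j) = true
    · rw [if_pos he]
      have hiffj : ∀ y : Nat × Nat, y ∈ pvBIter pos color n (j+1) ↔ y ∈ pvBIter pos color n j :=
        (set_equal_iff _ _).mp he
      have hprop : ∀ m y, y ∈ pvBIter pos color n (j+m) ↔ y ∈ pvBIter pos color n j := by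
        intro m
        induction m with
        | zero => intro y; rw [Nat.add_zero]
        | succ m ihm =>
          intro y
          have h1 : pvBIter pos color n (j+(m+1)) =
              pvBRound pos color n (pvBIter pos color n (j+m)) := rfl
          rw [h1, pvBRound_congr pos color n ihm]
          exact hiffj y
      by_cases hj2 : n*n+1 ≤ j
      · rw [hstab j (by omega), hstab (n*n+1) hK]
      · have h3 := hprop (n*n+1 - j) x
        rw [show j + (n*n+1 - j) = n*n+1 by omega] at h3
        exact h3.symm
    · rw [if_neg he]
      exact ihf (j+1) (by omega) x

theorem pvBIter_sound (pos : List (List Int)) (color : Int) :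
    ∀ k x, x ∈ pvBIter pos color pos.length k →
      pvCell pos color x ∧ pvAlive pos color x := by
  intro k
  induction k with
  | zero => intro x hx; simp [pvBIter] at hx
  | succ k ih =>
    intro x hx
    rw [pvBIter, mem_pvBRound] at hx
    obtain ⟨h1, h2, hc, hd⟩ := hx
    have hcell : pvCell pos color x := ⟨h1, h2, hc⟩
    refine ⟨hcell, ?_⟩
    rcases hd with hl | hl | hl | hl | ⟨hb, hm⟩ | ⟨hb, hm⟩ | ⟨hb, hm⟩ | ⟨hb, hm⟩
    · exact ⟨x, Relation.ReflTransGen.refl, Or.inl hl⟩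
    · exact ⟨x, Relation.ReflTransGen.refl, Or.inr (Or.inl hl)⟩
    · exact ⟨x, Relation.ReflTransGen.refl, Or.inr (Or.inr (Or.inl hl))⟩
    · exact ⟨x, Relation.ReflTransGen.refl, Or.inr (Or.inr (Or.inr hl))⟩
    · obtain ⟨hcu, y, hry, hly⟩ := ih _ hm
      exact ⟨y, Relation.ReflTransGen.head ⟨hcell, hcu, Or.inl ⟨hb, rfl⟩⟩ hry, hly⟩
    · obtain ⟨hcu, y, hry, hly⟩ := ih _ hm
      exact ⟨y, Relation.ReflTransGen.head ⟨hcell, hcu, Or.inr (Or.inl ⟨hb, rfl⟩)⟩ hry, hly⟩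
    · obtain ⟨hcu, y, hry, hly⟩ := ih _ hm
      exact ⟨y, Relation.ReflTransGen.head ⟨hcell, hcu, Or.inr (Or.inr (Or.inl rfl))⟩ hry, hly⟩
    · obtain ⟨hcu, y, hry, hly⟩ := ih _ hm
      exact ⟨y, Relation.ReflTransGen.head ⟨hcell, hcu, Or.inr (Or.inr (Or.inr rfl))⟩ hry, hly⟩

theorem pvBIter_complete (pos : List (List Int)) (color : Int) {x y : Nat × Nat}
    (hr : pvReach pos color x y) (hly : pvLib pos y) (hcx : pvCell pos color x) :
    x ∈ pvBIter pos color pos.length (pos.length*pos.length+1) := by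
  set n := pos.length with hn
  have hfix := pvBIter_fix pos color n
  revert hcx
  refine Relation.ReflTransGen.head_induction_on hr ?_ ?_
  · intro hcy
    rw [← hfix, mem_pvBRound]
    refine ⟨hcy.1, hcy.2.1, hcy.2.2, ?_⟩
    rcases hly with hl | hl | hl | hl
    · exact Or.inl hl
    · exact Or.inr (Or.inl hl)
    · exact Or.inr (Or.inr (Or.inl hl))
    · exact Or.inr (Or.inr (Or.inr (Or.inl hl)))
  · intro a c hadj hrc ihc hca
    have hcc : pvCell pos color c := hadj.2.1
    have hcmem := ihc hcc
    rw [← hfix, mem_pvBRound]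
    refine ⟨hca.1, hca.2.1, hca.2.2, ?_⟩
    rcases hadj.2.2 with ⟨hb, he⟩ | ⟨hb, he⟩ | he | he
    · exact Or.inr (Or.inr (Or.inr (Or.inr (Or.inl ⟨hb, he ▸ hcmem⟩))))
    · exact Or.inr (Or.inr (Or.inr (Or.inr (Or.inr (Or.inl ⟨hb, he ▸ hcmem⟩)))))
    · refine Or.inr (Or.inr (Or.inr (Or.inr (Or.inr (Or.inr (Or.inl ⟨?_, he ▸ hcmem⟩))))))
      have h5 := hcc.1
      rw [he] at h5
      simpa using h5
    · refine Or.inr (Or.inr (Or.inr (Or.inr (Or.inr (Or.inr (Or.inr ⟨?_, he ▸ hcmem⟩))))))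
      have h5 := hcc.2.1
      rw [he] at h5
      simpa using h5
-- ---------- assembling the two characterizations ----------
theorem alive_iff_not_dead {pos : List (List Int)} {color : Int} {x : Nat × Nat} :
    pvAlive pos color x ↔ ¬ pvDead pos color x := by
  unfold pvAlive pvDead
  constructor
  · rintro ⟨y, hr, hl⟩ hd
    exact hd y hr hl
  · intro h
    by_contra hno
    apply h
    intro y hr hl
    exact hno ⟨y, hr, hl⟩

theorem marked_all_iff (pos : List (List Int)) (color : Int) (x : Nat × Nat) :
    pvMarked pos color (pvCellsL pos) x ↔ pvCell pos color x := by
  constructor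
  · rintro ⟨s, -, hcs, hr⟩
    exact pvReach_cell hcs hr
  · intro hc
    exact ⟨x, (mem_pvCellsL pos x).mpr ⟨hc.1, hc.2.1⟩, hc, Relation.ReflTransGen.refl⟩

theorem remove_surrounded_agree (pos : List (List Int)) (color : Int)
    (hPre : ∀ row ∈ pos, pos.length ≤ row.length) :
    remove_surrounded pos color = remove_surrounded_alt pos color := by
  -- A's final state
  have h0 := pvGrouped0_spec pos
  have hInv0 : ScanInv pos color [] (pvGrouped0 pos) pos := by
    refine ⟨h0.1, ?_, ⟨rfl, fun a => rfl⟩, ?_⟩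
    · intro x
      rw [h0.2 x]
      simp [pvMarked]
    · intro x
      constructor
      · rintro ⟨⟨s, hs, -⟩, -⟩
        simp at hs
      · intro _
        rfl
  have hscan := scan_foldl pos color hPre (pvCellsL pos) [] (pvGrouped0 pos) pos hInv0
    (fun z hz => (mem_pvCellsL pos z).mp hz)
  rw [List.nil_append] at hscan
  -- B's fixpoint
  have hmemSN : ∀ x : Nat × Nat,
      x ∈ pvBIter pos color pos.length (pos.length*pos.length+1) ↔
        pvCell pos color x ∧ pvAlive pos color x := by
    intro x
    constructor
    · exact pvBIter_sound pos color _ x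
    · rintro ⟨hc, y, hr, hl⟩
      exact pvBIter_complete pos color hr hl hc
  have hmemLoop : ∀ x : Nat × Nat,
      x ∈ pvBLoop pos color pos.length (pos.length*pos.length+2) [] ↔
        x ∈ pvBIter pos color pos.length (pos.length*pos.length+1) := by
    intro x
    exact pvBLoop_mem pos color pos.length (pos.length*pos.length+2) 0 (by omega) x
  have haltdef : remove_surrounded_alt pos color =
      pos.mapIdx (fun i row => row.mapIdx (fun j v =>
        if j < pos.length ∧ v = color ∧
            (i, j) ∉ pvBLoop pos color pos.length (pos.length*pos.length+2) [] then 0 else v)) := rfl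
  rw [remove_surrounded_eq pos color, haltdef]
  set out := ((pvCellsL pos).foldl (pvStep pos color) (pvGrouped0 pos, pos)).2 with houtdef
  have hnp := hscan.npshape
  have hnz := hscan.npzero
  apply List.ext_getElem
  · rw [List.length_mapIdx]
    exact hnp.1
  intro i h1 h2
  rw [List.getElem_mapIdx]
  have hilt : i < pos.length := by rw [← hnp.1]; exact h1
  have hrowlen : (out.getD i []).length = (pos.getD i []).length := hnp.2 i
  rw [List.getD_eq_getElem out [] h1, List.getD_eq_getElem pos [] hilt] at hrowlen
  apply List.ext_getElem
  · rw [List.length_mapIdx]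
    exact hrowlen
  intro j hj1 hj2
  rw [List.getElem_mapIdx]
  have hjlt : j < (pos.getD i []).length := by
    rw [List.getD_eq_getElem pos [] hilt]
    rw [hrowlen] at hj1
    exact hj1
  have hv : pvAt pos i j = pos[i][j] := by
    unfold pvAt
    rw [List.getD_eq_getElem pos [] hilt, List.getD_eq_getElem _ 0 (by rwa [← List.getD_eq_getElem pos [] hilt])]
  have ho : pvAt out i j = out[i][j] := by
    unfold pvAt
    rw [List.getD_eq_getElem out [] h1, List.getD_eq_getElem _ 0 hj1]
  rw [← ho, ← hv]
  by_cases hcell : pvCell pos color (i, j)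
  · by_cases hdead : pvDead pos color (i, j)
    · -- stone of a dead group: both sides return 0
      have hA : pvAt out i j = 0 :=
        (hnz (i, j)).1 ⟨(marked_all_iff pos color (i, j)).mpr hcell, hdead⟩
      have hB : (i, j) ∉ pvBLoop pos color pos.length (pos.length*pos.length+2) [] := by
        intro hmem
        exact alive_iff_not_dead.mp ((hmemSN (i, j)).mp ((hmemLoop (i, j)).mp hmem)).2 hdead
      rw [hA, if_pos ⟨hcell.2.1, hcell.2.2, hB⟩]
    · -- live stone: both sides keep the original value
      have hA : pvAt out i j = pvAt pos i j :=
        (hnz (i, j)).2 (fun hc => hdead hc.2)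
      have hB : (i, j) ∈ pvBLoop pos color pos.length (pos.length*pos.length+2) [] :=
        (hmemLoop (i, j)).mpr ((hmemSN (i, j)).mpr ⟨hcell, alive_iff_not_dead.mpr hdead⟩)
      rw [hA, if_neg (fun hcon => hcon.2.2 hB)]
  · -- not a stone of our colour inside the square board: untouched
    have hA : pvAt out i j = pvAt pos i j := by
      refine (hnz (i, j)).2 ?_
      rintro ⟨hmk, -⟩
      exact hcell ((marked_all_iff pos color (i, j)).mp hmk)
    have hcon : ¬(j < pos.length ∧ pvAt pos i j = color ∧
        (i, j) ∉ pvBLoop pos color pos.length (pos.length*pos.length+2) []) := by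
      rintro ⟨hjn, hvc, -⟩
      exact hcell ⟨hilt, hjn, hvc⟩
    rw [hA, if_neg hcon]

-- ===== VERDICT (by name: the statement is the Claim_ definition above) =====
theorem remove_surrounded_spec : Claim_equal_remove_surrounded := by
  intro position color _ hPre
  unfold Spec_remove_surrounded
  exact remove_surrounded_agree position color hPre
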